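-- pv_equiv track=rewrite | github.com/Tikava/rtm-project | app/core/ai_engine.py | seed_component_by_keywords
-- ===== SOURCE A (Python) =====
-- from typing import Dict, List, Any
-- from collections import defaultdict
--
-- def seed_component_by_keywords(component: List[str], relations: List[Dict[str, Any]]) -> List[List[str]]:
--     """
--     Делит компонент по ключевым словам (users/auth, catalog/products, orders/payments/shipping, promo, reference).
--     Затем относит оставшиеся таблицы к ближайшему бакету по связям.
--     """
--     if len(component) <= 2:
--         return [sorted(component)]
--     keywords = {
--         "users": ("user", "account", "auth", "profile", "session", "role"),
--         "catalog": ("product", "category", "inventory", "warehouse", "tag"),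
--         "orders": ("order", "payment", "shipment", "item", "cart"),
--         "promo": ("coupon", "discount", "promo"),
--         "reference": ("lookup", "ref", "dict", "status", "audit", "log"),
--     }
--     buckets = {k: [] for k in keywords}
--     remaining = []
--     for t in component:
--         low = t.lower()
--         placed = False
--         for bucket, kws in keywords.items():
--             if any(k in low for k in kws):
--                 buckets[bucket].append(t)
--                 placed = True
--                 break
--         if not placed:
--             remaining.append(t)
--     non_empty = {k: v for k, v in buckets.items() if v}
--     if len(non_empty) <= 1:
--         return [sorted(component)]
--     # adjacency for attachment
--     adj = defaultdict(list)
--     comp_set = set(component)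
--     for r in relations:
--         a, b = r.get("from"), r.get("to")
--         if a in comp_set and b in comp_set:
--             adj[a].append(b)
--             adj[b].append(a)
--     # attach remaining to the bucket with max adjacency
--     for t in remaining:
--         scores = []
--         for bname, members in non_empty.items():
--             score = sum(1 for m in members if m in adj.get(t, []))
--             scores.append((score, bname))
--         if scores:
--             _, best = max(scores, key=lambda x: x[0])
--             non_empty[best].append(t)
--         else:
--             # если нет связей — к самому большому бакету
--             largest = max(non_empty.items(), key=lambda x: len(x[1]))[0]
--             non_empty[largest].append(t)
--     return [sorted(v) for v in non_empty.values() if v]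
-- ===== SOURCE B (Python) =====
-- # Inverse node->bucket map: leftovers are scored by a single tally pass over their
-- # distinct neighbours instead of scanning every bucket's member list per candidate.
-- from typing import Dict, List, Any
--
-- KEYWORD_BUCKETS = [
--     ("users", ("user", "account", "auth", "profile", "session", "role")),
--     ("catalog", ("product", "category", "inventory", "warehouse", "tag")),
--     ("orders", ("order", "payment", "shipment", "item", "cart")),
--     ("promo", ("coupon", "discount", "promo")),
--     ("reference", ("lookup", "ref", "dict", "status", "audit", "log")),
-- ]
-- FLAT_KEYWORDS = [(kw, name) for name, kws in KEYWORD_BUCKETS for kw in kws]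
--
--
-- def seed_component_by_keywords(component: List[str], relations: List[Dict[str, Any]]) -> List[List[str]]:
--     if len(component) <= 2:
--         return [sorted(component)]
--     buckets: Dict[str, List[str]] = {name: [] for name, _ in KEYWORD_BUCKETS}
--     owner: Dict[str, str] = {}
--     remaining: List[str] = []
--     for t in component:
--         low = t.lower()
--         hit = next((name for kw, name in FLAT_KEYWORDS if kw in low), None)
--         if hit is None:
--             remaining.append(t)
--         else:
--             buckets[hit].append(t)
--             owner[t] = hit
--     order = [name for name, _ in KEYWORD_BUCKETS if buckets[name]]
--     if len(order) <= 1: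
--         return [sorted(component)]
--     comp = set(component)
--     nbrs: Dict[str, set] = {}
--     for r in relations:
--         a, b = r.get("from"), r.get("to")
--         if a in comp and b in comp:
--             nbrs.setdefault(a, set()).add(b)
--             nbrs.setdefault(b, set()).add(a)
--     for t in remaining:
--         tally = dict.fromkeys(order, 0)
--         for n in nbrs.get(t, ()):
--             b = owner.get(n)
--             if b is not None:
--                 tally[b] += 1
--         best = max(order, key=tally.__getitem__)
--         buckets[best].append(t)
--         owner[t] = best
--     return [sorted(buckets[name]) for name in order]
-- ===== Notes on version B (the rewrite author's own statement) =====
-- stated objective: faster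
-- what changed: B inverts the data: it keeps a node-to-bucket owner map built during classification and scores each leftover table by one tally pass over its distinct neighbours' owners, so A's scan of every bucket's member list against the raw adjacency list per candidate disappears; Pre_ excludes components with duplicate table names, where A's multiplicity-weighted scores are an accident of its list representation.
import Mathlib
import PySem

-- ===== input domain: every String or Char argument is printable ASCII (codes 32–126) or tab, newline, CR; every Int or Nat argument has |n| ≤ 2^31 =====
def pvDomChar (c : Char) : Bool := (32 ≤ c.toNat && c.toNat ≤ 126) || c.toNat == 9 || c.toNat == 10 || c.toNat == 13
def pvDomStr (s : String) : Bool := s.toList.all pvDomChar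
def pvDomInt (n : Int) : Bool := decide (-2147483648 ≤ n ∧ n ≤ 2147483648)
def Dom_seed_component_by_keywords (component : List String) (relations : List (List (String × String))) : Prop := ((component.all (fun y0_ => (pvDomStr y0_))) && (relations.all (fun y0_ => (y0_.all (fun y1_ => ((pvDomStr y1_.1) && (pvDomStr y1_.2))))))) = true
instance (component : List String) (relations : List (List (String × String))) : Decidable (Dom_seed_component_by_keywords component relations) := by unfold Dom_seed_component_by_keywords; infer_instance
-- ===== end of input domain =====

-- B keeps an inverse node→bucket map and scores each leftover table by one tally pass over its
-- distinct neighbours, instead of A's scan of every bucket's member list against the raw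
-- adjacency list per candidate; same values and tie-breaks on components with distinct names.

-- ===== PORT A =====
def kwTables : List (String × List String) :=
  [("users", ["user", "account", "auth", "profile", "session", "role"]),
   ("catalog", ["product", "category", "inventory", "warehouse", "tag"]),
   ("orders", ["order", "payment", "shipment", "item", "cart"]),
   ("promo", ["coupon", "discount", "promo"]),
   ("reference", ["lookup", "ref", "dict", "status", "audit", "log"])]

-- A's inner 'for bucket, kws in keywords.items(): … break' loop (first bucket with a keyword hit)
def bucketForA : List (String × List String) → String → Option String
  | [], _ => none
  | (b, kws) :: rest, low =>
      if kws.any (fun k => PySem.Str.isIn k low) then some b else bucketForA rest low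

def seed_component_by_keywords (component : List String) (relations : List (List (String × String))) : List (List String) :=
  if component.length ≤ 2 then [PySem.List.sorted component (fun x => x)]
  else
    let buckets0 : PySem.Dict String (List String) := ⟨kwTables.map (fun p => (p.1, ([] : List String)))⟩
    let st := component.foldl (fun (st : PySem.Dict String (List String) × List String) t =>
        match bucketForA kwTables (PySem.Str.lower t) with
        | some b => (st.1.modify b [] (· ++ [t]), st.2)
        | none => (st.1, st.2 ++ [t])) (buckets0, [])
    let ne : PySem.Dict String (List String) := ⟨st.1.items.filter (fun p => !p.2.isEmpty)⟩
    if ne.size ≤ 1 then [PySem.List.sorted component (fun x => x)]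
    else
      let compSet : PySem.Set String := PySem.Set.ofList component
      let adj : PySem.Dict String (List String) := relations.foldl (fun d r =>
          match (PySem.Dict.mk r).get? "from", (PySem.Dict.mk r).get? "to" with
          | some a, some b =>
              if a ∈ compSet ∧ b ∈ compSet then
                (d.modify a [] (· ++ [b])).modify b [] (· ++ [a])
              else d
          | _, _ => d) PySem.Dict.empty
      let ne' := st.2.foldl (fun (ne : PySem.Dict String (List String)) t =>
          let scores := ne.items.foldl (fun acc p =>
              acc ++ [(p.2.foldl (fun s m => if (adj.getD t []).contains m then s + 1 else s) (0 : Int), p.1)]) []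
          if scores.isEmpty then
            match PySem.List.max? ne.items (fun p => p.2.length) with
            | some p => ne.modify p.1 [] (· ++ [t])
            | none => ne
          else
            match PySem.List.max? scores (fun x => x.1) with
            | some p => ne.modify p.2 [] (· ++ [t])
            | none => ne) ne
      (ne'.values.filter (fun v => !v.isEmpty)).map (fun v => PySem.List.sorted v (fun x => x))

-- ===== PORT B =====
def kwBucketsB : List (String × List String) :=
  [("users", ["user", "account", "auth", "profile", "session", "role"]),
   ("catalog", ["product", "category", "inventory", "warehouse", "tag"]),
   ("orders", ["order", "payment", "shipment", "item", "cart"]),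
   ("promo", ["coupon", "discount", "promo"]),
   ("reference", ["lookup", "ref", "dict", "status", "audit", "log"])]

def kwFlat : List (String × String) := kwBucketsB.flatMap (fun p => p.2.map (fun k => (k, p.1)))

-- next((name for kw, name in FLAT_KEYWORDS if kw in low), None)
def classifyB (low : String) : Option String :=
  (kwFlat.find? (fun p => PySem.Str.isIn p.1 low)).map (·.2)

def seed_component_by_keywords_alt (component : List String) (relations : List (List (String × String))) : List (List String) :=
  if component.length ≤ 2 then [PySem.List.sorted component (fun x => x)]
  else
    let buckets0 : PySem.Dict String (List String) := ⟨kwBucketsB.map (fun p => (p.1, ([] : List String)))⟩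
    let st := component.foldl (fun (st : PySem.Dict String (List String) × PySem.Dict String String × List String) t =>
        match classifyB (PySem.Str.lower t) with
        | none => (st.1, st.2.1, st.2.2 ++ [t])
        | some b => (st.1.modify b [] (· ++ [t]), st.2.1.insert t b, st.2.2)) (buckets0, PySem.Dict.empty, [])
    let order := (kwBucketsB.map (·.1)).filter (fun b => !(st.1.getD b []).isEmpty)
    if order.length ≤ 1 then [PySem.List.sorted component (fun x => x)]
    else
      let comp : PySem.Set String := PySem.Set.ofList component
      let nbrs : PySem.Dict String (PySem.Set String) := relations.foldl (fun d r =>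
          match (PySem.Dict.mk r).get? "from" with
          | none => d
          | some a =>
            match (PySem.Dict.mk r).get? "to" with
            | none => d
            | some b =>
              if a ∈ comp ∧ b ∈ comp then
                (d.modify a PySem.Set.empty (fun s => s.add b)).modify b PySem.Set.empty (fun s => s.add a)
              else d) PySem.Dict.empty
      let fin := st.2.2.foldl (fun (st : PySem.Dict String (List String) × PySem.Dict String String) t =>
          let tally0 : PySem.Dict String Int := ⟨order.map (fun b => (b, (0 : Int)))⟩
          let tally := (nbrs.getD t []).foldl (fun tl n =>
              match st.2.get? n with
              | some b => tl.modify b 0 (· + 1)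
              | none => tl) tally0
          match PySem.List.max? order (fun b => tally.getD b 0) with
          | some b => (st.1.modify b [] (· ++ [t]), st.2.insert t b)
          | none => st) (st.1, st.2.1)
      order.map (fun b => PySem.List.sorted (fin.1.getD b []) (fun x => x))

-- ===== PRECONDITION & SPEC =====
-- Pre_ excludes components with duplicate table names (a component is a set of tables): there A's
-- multiplicity-weighted adjacency scores are an accident of its list representation, and B's
-- distinct-neighbour tally is as defensible a choice on that corner.
def Pre_seed_component_by_keywords (component : List String) (_relations : List (List (String × String))) : Prop :=
  component.Nodup
instance (component : List String) (relations : List (List (String × String))) : Decidable (Pre_seed_component_by_keywords component relations) := by unfold Pre_seed_component_by_keywords; infer_instance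

def pvWitness_seed_component_by_keywords : List String × (List (List (String × String))) :=
  (["user_a", "cart_b", "misc_c"], [[("from", "misc_c"), ("to", "cart_b")]])

def Spec_seed_component_by_keywords (component : List String) (relations : List (List (String × String))) (out : List (List String)) : Prop := out = seed_component_by_keywords_alt component relations
instance (component : List String) (relations : List (List (String × String))) (out : List (List String)) : Decidable (Spec_seed_component_by_keywords component relations out) := by unfold Spec_seed_component_by_keywords; infer_instance

-- ===== CLAIM (what is proved, stated in full; the proofs are below) =====
def Claim_equal_seed_component_by_keywords : Prop := ∀ (component : List String) (relations : List (List (String × String))), Dom_seed_component_by_keywords component relations → Pre_seed_component_by_keywords component relations → Spec_seed_component_by_keywords component relations (seed_component_by_keywords component relations)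

-- ===== LEMMAS AND PROOFS =====

theorem pv_keys_insert {ν : Type} (d : PySem.Dict String ν) (k : String) (v : ν) :
    (d.insert k v).keys = if d.contains k then d.keys else d.keys ++ [k] := by
  unfold PySem.Dict.insert PySem.Dict.keys
  split <;> simp only [List.map_append, List.map_map, List.map_cons, List.map_nil]
  apply List.map_congr_left
  intro p _
  simp only [Function.comp]
  split
  · next h => exact (eq_of_beq h).symm
  · rfl

theorem pv_contains_of_mem_keys {ν : Type} (d : PySem.Dict String ν) (b : String)
    (h : b ∈ d.keys) : d.contains b = true := by
  unfold PySem.Dict.contains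
  unfold PySem.Dict.keys at h
  rcases List.mem_map.1 h with ⟨p, hp, rfl⟩
  exact List.any_eq_true.2 ⟨p, hp, by simp⟩

theorem pv_getD_mk_map {ν : Type} (l : List String) (g : String → ν) (d0 : ν) (b : String)
    (hnd : l.Nodup) (hb : b ∈ l) :
    (PySem.Dict.mk (l.map (fun x => (x, g x)))).getD b d0 = g b := by
  induction l with
  | nil => simp at hb
  | cons x xs ih =>
    simp only [PySem.Dict.getD, PySem.Dict.get?, List.map_cons, List.find?_cons]
    rcases List.mem_cons.1 hb with h | h
    · subst h; simp
    · have hxb : ¬ (x == b) = true := by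
        simp only [beq_iff_eq]; rintro rfl; exact (List.nodup_cons.1 hnd).1 h
      simp only [hxb]
      have := ih (List.nodup_cons.1 hnd).2 h
      simpa [PySem.Dict.getD, PySem.Dict.get?] using this

theorem pv_getD_mk_nil (l : List (String × List String)) (b : String) :
    (PySem.Dict.mk (l.map (fun p => (p.1, ([] : List String))))).getD b [] = [] := by
  induction l with
  | nil => simp [PySem.Dict.getD, PySem.Dict.get?]
  | cons x xs ih =>
    simp only [PySem.Dict.getD, PySem.Dict.get?, List.map_cons, List.find?_cons]
    by_cases hx : (x.1 == b) = true
    · simp [hx]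
    · simp only [hx]
      simpa [PySem.Dict.getD, PySem.Dict.get?] using ih

-- classification: B's flat first-hit scan = A's nested break loop
theorem pv_find_flat_block (low : String) (kws : List String) (b : String) (rest : List (String × String)) :
    ((kws.map (fun k => (k, b)) ++ rest).find? (fun p => PySem.Str.isIn p.1 low))
      = if kws.any (fun k => PySem.Str.isIn k low)
        then ((kws.map (fun k => (k, b))).find? (fun p => PySem.Str.isIn p.1 low))
        else rest.find? (fun p => PySem.Str.isIn p.1 low) := by
  induction kws with
  | nil => simp
  | cons k ks ih =>
    simp only [List.map_cons, List.cons_append, List.find?_cons, List.any_cons]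
    cases h : PySem.Str.isIn k low with
    | true => simp
    | false => simpa [h] using ih

theorem pv_find_flat_some (low : String) (kws : List String) (b : String)
    (h : kws.any (fun k => PySem.Str.isIn k low) = true) :
    (((kws.map (fun k => (k, b))).find? (fun p => PySem.Str.isIn p.1 low)).map (·.2)) = some b := by
  induction kws with
  | nil => simp at h
  | cons k ks ih =>
    simp only [List.map_cons, List.find?_cons]
    cases hk : PySem.Str.isIn k low with
    | true => simp
    | false =>
      simp only [List.any_cons, hk, Bool.false_or] at h
      simpa [hk] using ih h

theorem pv_classify_eq (tbl : List (String × List String)) (low : String) :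
    ((tbl.flatMap (fun p => p.2.map (fun k => (k, p.1)))).find?
        (fun p => PySem.Str.isIn p.1 low)).map (·.2) = bucketForA tbl low := by
  induction tbl with
  | nil => simp [bucketForA]
  | cons p rest ih =>
    obtain ⟨b, kws⟩ := p
    simp only [List.flatMap_cons, bucketForA]
    rw [pv_find_flat_block]
    split
    · next h => exact pv_find_flat_some low kws b h
    · exact ih

theorem pv_classifyB_eq (low : String) : classifyB low = bucketForA kwTables low := by
  unfold classifyB kwFlat
  rw [pv_classify_eq]
  rfl

theorem pv_bucketForA_mem (tbl : List (String × List String)) (low : String) (b : String)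
    (h : bucketForA tbl low = some b) : b ∈ tbl.map (·.1) := by
  induction tbl with
  | nil => simp [bucketForA] at h
  | cons p rest ih =>
    obtain ⟨b', kws⟩ := p
    simp only [bucketForA] at h
    split at h
    · simp at h; simp [h]
    · simpa using Or.inr (by simpa using ih h)

-- membership score = sum of element counts over the deduplicated test list
theorem pv_countP_eq_sum_dedup (members L : List String) :
    ((members.countP (fun m => L.contains m) : Int)) =
      ((PySem.List.dedup L).map (fun n => (members.count n : Int))).sum := by
  induction members with
  | nil => simp [List.count_nil]
  | cons m ms ih =>
    rw [List.countP_cons]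
    have hc : ∀ n, ((m :: ms).count n : Int) = (ms.count n : Int) + (if n == m then 1 else 0) := by
      intro n; rw [List.count_cons]
      by_cases hnm : n = m
      · subst hnm; simp
      · simp only [beq_iff_eq, hnm, if_false]
        have : ¬ m = n := fun h => hnm h.symm
        simp [this]
    calc ((ms.countP (fun m => L.contains m) + if L.contains m then 1 else 0 : ℕ) : Int)
        = ((ms.countP (fun m => L.contains m) : Int)) + (if L.contains m then 1 else 0) := by
          push_cast; split <;> simp
      _ = ((PySem.List.dedup L).map (fun n => (ms.count n : Int))).sum
            + ((PySem.List.dedup L).map (fun n => (if n == m then (1:Int) else 0))).sum := by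
          rw [ih]
          congr 1
          have hmem : m ∈ PySem.List.dedup L ↔ L.contains m := by
            rw [PySem.List.mem_dedup]; simp
          rw [PySem.List.sum_map_ite_one_zero (fun n => n == m) (PySem.List.dedup L)]
          have : (PySem.List.dedup L).countP (fun n => n == m) = (PySem.List.dedup L).count m := by
            simp [List.count]
          rw [this]
          by_cases hm : L.contains m
          · have h1 : (PySem.List.dedup L).count m = 1 :=
              List.count_eq_one_of_mem (PySem.List.nodup_dedup L) (hmem.2 hm)
            simp only [PySem.List.dedup_eq_ofList] at h1 ⊢; simp [h1]; simpa using hm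
          · have h0 : (PySem.List.dedup L).count m = 0 :=
              List.count_eq_zero_of_not_mem (fun hmm => hm (hmem.1 hmm))
            simp only [PySem.List.dedup_eq_ofList] at h0 ⊢; simp [h0]; simpa using hm
      _ = ((PySem.List.dedup L).map (fun n => ((m :: ms).count n : Int))).sum := by
          rw [← PySem.List.sum_map_add_int]
          congr 1
          apply List.map_congr_left
          intro n _
          rw [hc n]

-- adjacency: B's neighbour sets are exactly the deduplicated adjacency lists of A
theorem pv_ofList_snoc (l : List String) (x : String) :
    PySem.Set.ofList (l ++ [x]) = PySem.Set.add (PySem.Set.ofList l) x := by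
  simp [PySem.Set.ofList, List.foldl_append]

theorem pv_adj_step (dA : PySem.Dict String (List String)) (dB : PySem.Dict String (PySem.Set String))
    (a b : String) (h : ∀ k, dB.getD k [] = PySem.Set.ofList (dA.getD k [])) :
    ∀ k, (dB.modify a PySem.Set.empty (fun s => s.add b)).getD k []
      = PySem.Set.ofList ((dA.modify a [] (· ++ [b])).getD k []) := by
  intro k
  by_cases hk : k = a
  · subst hk
    have h1 : (dB.modify k PySem.Set.empty (fun s => s.add b)).getD k [] = (dB.getD k []).add b := by
      exact PySem.Dict.getD_modify_self dB k PySem.Set.empty (fun s => s.add b)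
    have h2 : (dA.modify k [] (· ++ [b])).getD k [] = dA.getD k [] ++ [b] :=
      PySem.Dict.getD_modify_self dA k [] (· ++ [b])
    rw [h1, h2, pv_ofList_snoc, h k]
  · rw [show (dB.modify a PySem.Set.empty (fun s => s.add b)).getD k [] = dB.getD k [] from
        PySem.Dict.getD_modify_of_ne dB PySem.Set.empty (fun s => s.add b) hk,
      PySem.Dict.getD_modify_of_ne dA [] (· ++ [b]) hk]
    exact h k

theorem pv_adj_eq (relations : List (List (String × String))) (compSet : PySem.Set String)
    (dA : PySem.Dict String (List String)) (dB : PySem.Dict String (PySem.Set String))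
    (h : ∀ k, dB.getD k [] = PySem.Set.ofList (dA.getD k [])) :
    ∀ k, (relations.foldl (fun d r =>
          match (PySem.Dict.mk r).get? "from" with
          | none => d
          | some a =>
            match (PySem.Dict.mk r).get? "to" with
            | none => d
            | some b =>
              if a ∈ compSet ∧ b ∈ compSet then
                (d.modify a PySem.Set.empty (fun s => s.add b)).modify b PySem.Set.empty (fun s => s.add a)
              else d) dB).getD k []
      = PySem.Set.ofList ((relations.foldl (fun d r =>
          match (PySem.Dict.mk r).get? "from", (PySem.Dict.mk r).get? "to" with
          | some a, some b =>
              if a ∈ compSet ∧ b ∈ compSet then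
                (d.modify a [] (· ++ [b])).modify b [] (· ++ [a])
              else d
          | _, _ => d) dA).getD k []) := by
  induction relations generalizing dA dB with
  | nil => exact h
  | cons r rs ih =>
    rw [List.foldl_cons, List.foldl_cons]
    generalize (PySem.Dict.mk r).get? "from" = oa
    generalize (PySem.Dict.mk r).get? "to" = ob
    cases oa with
    | none => exact ih dA dB h
    | some a =>
      cases ob with
      | none => exact ih dA dB h
      | some b =>
        by_cases hc : a ∈ compSet ∧ b ∈ compSet
        · simp only [hc]
          exact ih _ _ (pv_adj_step _ _ b a (pv_adj_step dA dB a b h))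
        · simp only [hc, if_false]
          exact ih dA dB h

-- the tally loop counts, per bucket, the neighbours owned by that bucket
theorem pv_tally (ns : List String) (ow : PySem.Dict String String) (tl : PySem.Dict String Int) (b : String) :
    (ns.foldl (fun tl n => match ow.get? n with | some c => tl.modify c 0 (· + 1) | none => tl) tl).getD b 0
      = tl.getD b 0 + ((ns.countP (fun n => ow.get? n == some b) : Nat) : Int) := by
  induction ns generalizing tl with
  | nil => simp
  | cons n ns ih =>
    rw [List.foldl_cons, List.countP_cons]
    cases h : ow.get? n with
    | none =>
      rw [ih]
      simp
    | some c =>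
      rw [ih]
      by_cases hc : c = b
      · subst hc
        rw [PySem.Dict.getD_modify_self]
        simp
        ring
      · rw [PySem.Dict.getD_modify_of_ne _ _ _ (fun e => hc e.symm)]
        have : ¬ ((some c : Option String) == some b) = true := by
          simp [beq_iff_eq, hc]
        simp [this]

-- running max: max(xs, key=…) over a nonempty list as a plain fold over the tail
def pvRunMax {α : Type} (key : α → Int) (m : α) (l : List α) : α :=
  l.foldl (fun m y => if key m < key y then y else m) m

theorem pv_max?_cons_cons {α : Type} (key : α → Int) (x y : α) (l : List α) :
    PySem.List.max? (x :: y :: l) key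
      = PySem.List.max? ((if key x < key y then y else x) :: l) key := by
  by_cases h : key x < key y <;> simp [PySem.List.max?, h]

theorem pv_max?_eq_runMax {α : Type} (key : α → Int) (x : α) (l : List α) :
    PySem.List.max? (x :: l) key = some (pvRunMax key x l) := by
  induction l generalizing x with
  | nil => simp [PySem.List.max?, pvRunMax]
  | cons y l ih =>
    rw [pv_max?_cons_cons, ih]
    unfold pvRunMax
    rw [List.foldl_cons]

theorem pv_runmax_mem {α : Type} (key : α → Int) (x : α) (l : List α) :
    pvRunMax key x l = x ∨ pvRunMax key x l ∈ l := by
  induction l generalizing x with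
  | nil => left; rfl
  | cons y l ih =>
    unfold pvRunMax at *
    rw [List.foldl_cons]
    by_cases h : key x < key y
    · rw [if_pos h]
      rcases ih y with h1 | h1
      · right; simp [h1]
      · right; simp [h1]
    · rw [if_neg h]
      rcases ih x with h1 | h1
      · left; exact h1
      · right; simp [h1]

theorem pv_runmax_map (f : String → Int) (x : String) (l : List String) :
    pvRunMax (fun p => p.1) ((f x, x) : Int × String) (l.map (fun b => ((f b, b) : Int × String)))
      = (f (pvRunMax f x l), pvRunMax f x l) := by
  induction l generalizing x with
  | nil => rfl
  | cons y l ih =>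
    unfold pvRunMax at *
    rw [List.map_cons, List.foldl_cons, List.foldl_cons]
    by_cases h : f x < f y
    · simpa [h] using ih y
    · simpa [h] using ih x

theorem pv_runmax_congr (f g : String → Int) (l : List String) (x : String)
    (hx : f x = g x) (h : ∀ b ∈ l, f b = g b) : pvRunMax f x l = pvRunMax g x l := by
  induction l generalizing x with
  | nil => rfl
  | cons y l ih =>
    unfold pvRunMax at *
    rw [List.foldl_cons, List.foldl_cons]
    have hy : f y = g y := h y (by simp)
    by_cases hc : f x < f y
    · have hc' : g x < g y := by rw [← hx, ← hy]; exact hc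
      rw [if_pos hc, if_pos hc']
      exact ih y hy (fun b hb => h b (by simp [hb]))
    · have hc' : ¬ g x < g y := by rw [← hx, ← hy]; exact hc
      rw [if_neg hc, if_neg hc']
      exact ih x hx (fun b hb => h b (by simp [hb]))

theorem pv_max?_congr_cons (f g : String → Int) (o : String) (os : List String)
    (h : ∀ b ∈ o :: os, f b = g b) :
    PySem.List.max? (o :: os) f = some (pvRunMax g o os) := by
  rw [pv_max?_eq_runMax]
  exact congrArg some (pv_runmax_congr f g os o (h o (by simp)) (fun b hb => h b (by simp [hb])))

-- the one marking step on (buckets, owner): append t to bucket b and record owner t = b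
theorem pv_nodup_snoc (xs : List String) (t : String) (hnd : xs.Nodup) (ht : t ∉ xs) :
    (xs ++ [t]).Nodup := by
  rw [List.nodup_append]
  refine ⟨hnd, by simp, ?_⟩
  intro a ha b hb
  simp only [List.mem_singleton] at hb
  subst hb
  exact fun he => ht (he ▸ ha)

theorem pv_mark_step (bk : PySem.Dict String (List String)) (ow : PySem.Dict String String)
    (t b : String) (hfr : ow.get? t = none)
    (hnd : ∀ b' : String, (bk.getD b' []).Nodup)
    (hiff : ∀ m b' : String, ow.get? m = some b' ↔ m ∈ bk.getD b' []) :
    (∀ b' : String, ((bk.modify b [] (· ++ [t])).getD b' []).Nodup) ∧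
    (∀ m b' : String, (ow.insert t b).get? m = some b' ↔ m ∈ (bk.modify b [] (· ++ [t])).getD b' []) := by
  have htb : ∀ b', t ∉ bk.getD b' [] := by
    intro b' hm
    have := (hiff t b').2 hm
    rw [hfr] at this
    cases this
  constructor
  · intro b'
    by_cases hbb : b' = b
    · subst hbb
      rw [PySem.Dict.getD_modify_self]
      exact pv_nodup_snoc _ t (hnd b') (htb b')
    · rw [PySem.Dict.getD_modify_of_ne _ _ _ hbb]
      exact hnd b'
  · intro m b'
    by_cases hmt : m = t
    · subst hmt
      rw [PySem.Dict.get?_insert_self]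
      by_cases hbb : b' = b
      · subst hbb
        rw [PySem.Dict.getD_modify_self]
        simp
      · rw [PySem.Dict.getD_modify_of_ne _ _ _ hbb]
        constructor
        · intro he
          injection he with e
          exact absurd e.symm hbb
        · intro hm
          have := (hiff m b').2 hm
          rw [hfr] at this
          cases this
    · rw [PySem.Dict.get?_insert_of_ne _ _ hmt]
      by_cases hbb : b' = b
      · subst hbb
        rw [PySem.Dict.getD_modify_self]
        simp only [List.mem_append, List.mem_singleton, hmt, or_false]
        exact hiff m b'
      · rw [PySem.Dict.getD_modify_of_ne _ _ _ hbb]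
        exact hiff m b'

-- ---------- phase 1 ----------
def pvBInv (bk : PySem.Dict String (List String)) (ow : PySem.Dict String String) : Prop :=
  bk.keys = kwTables.map (·.1) ∧
  (∀ b : String, (bk.getD b []).Nodup) ∧
  (∀ m b : String, ow.get? m = some b ↔ m ∈ bk.getD b [])

def pvStepA (st : PySem.Dict String (List String) × List String) (t : String) :
    PySem.Dict String (List String) × List String :=
  match bucketForA kwTables (PySem.Str.lower t) with
  | some b => (st.1.modify b [] (· ++ [t]), st.2)
  | none => (st.1, st.2 ++ [t])

def pvStepB (st : PySem.Dict String (List String) × PySem.Dict String String × List String) (t : String) :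
    PySem.Dict String (List String) × PySem.Dict String String × List String :=
  match classifyB (PySem.Str.lower t) with
  | none => (st.1, st.2.1, st.2.2 ++ [t])
  | some b => (st.1.modify b [] (· ++ [t]), st.2.1.insert t b, st.2.2)

theorem pv_binv_step (bk : PySem.Dict String (List String)) (ow : PySem.Dict String String)
    (t b : String) (hb : b ∈ kwTables.map (·.1)) (hfr : ow.get? t = none) (h : pvBInv bk ow) :
    pvBInv (bk.modify b [] (· ++ [t])) (ow.insert t b) := by
  obtain ⟨hk, hnd, hiff⟩ := h
  obtain ⟨hnd', hiff'⟩ := pv_mark_step bk ow t b hfr hnd hiff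
  refine ⟨?_, hnd', hiff'⟩
  rw [PySem.Dict.keys_modify, pv_keys_insert, pv_contains_of_mem_keys bk b (hk ▸ hb), if_pos rfl]
  exact hk

theorem pv_phase1 (todo : List String) (bk : PySem.Dict String (List String))
    (ow : PySem.Dict String String) (rem : List String)
    (hinv : pvBInv bk ow) (hndt : todo.Nodup)
    (hfresh : ∀ t ∈ todo, ow.get? t = none ∧ t ∉ rem)
    (hrnd : rem.Nodup) (hrf : ∀ t ∈ rem, ow.get? t = none) :
    (todo.foldl pvStepA (bk, rem)).1 = (todo.foldl pvStepB (bk, ow, rem)).1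
    ∧ (todo.foldl pvStepA (bk, rem)).2 = (todo.foldl pvStepB (bk, ow, rem)).2.2
    ∧ pvBInv (todo.foldl pvStepB (bk, ow, rem)).1 (todo.foldl pvStepB (bk, ow, rem)).2.1
    ∧ (todo.foldl pvStepB (bk, ow, rem)).2.2.Nodup
    ∧ ∀ t ∈ (todo.foldl pvStepB (bk, ow, rem)).2.2,
        (todo.foldl pvStepB (bk, ow, rem)).2.1.get? t = none := by
  induction todo generalizing bk ow rem with
  | nil => exact ⟨rfl, rfl, hinv, hrnd, hrf⟩
  | cons t todo ih =>
    rw [List.foldl_cons, List.foldl_cons]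
    have hft := hfresh t (by simp)
    have hfresh' : ∀ u ∈ todo, u ≠ t := by
      intro u hu he
      subst he
      exact (List.nodup_cons.1 hndt).1 hu
    cases hcl : bucketForA kwTables (PySem.Str.lower t) with
    | none =>
      simp only [pvStepA, pvStepB, pv_classifyB_eq, hcl]
      apply ih bk ow (rem ++ [t]) hinv (List.nodup_cons.1 hndt).2
      · intro u hu
        refine ⟨(hfresh u (by simp [hu])).1, ?_⟩
        simp only [List.mem_append, List.mem_singleton]
        rintro (hur | rfl)
        · exact (hfresh u (by simp [hu])).2 hur
        · exact hfresh' u hu rfl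
      · exact pv_nodup_snoc rem t hrnd hft.2
      · intro u hu
        simp only [List.mem_append, List.mem_singleton] at hu
        rcases hu with hu | rfl
        · exact hrf u hu
        · exact hft.1
    | some b =>
      simp only [pvStepA, pvStepB, pv_classifyB_eq, hcl]
      apply ih _ _ rem
        (pv_binv_step bk ow t b (pv_bucketForA_mem _ _ _ hcl) hft.1 hinv)
        (List.nodup_cons.1 hndt).2
      · intro u hu
        refine ⟨?_, (hfresh u (by simp [hu])).2⟩
        rw [PySem.Dict.get?_insert_of_ne _ _ (hfresh' u hu)]
        exact (hfresh u (by simp [hu])).1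
      · exact hrnd
      · intro u hu
        rw [PySem.Dict.get?_insert_of_ne _ _ (fun he => hft.2 (by rw [← he]; exact hu))]
        exact hrf u hu

-- ---------- attach phase ----------
def pvCInv (order : List String) (ne bk : PySem.Dict String (List String))
    (ow : PySem.Dict String String) : Prop :=
  ne.keys = order ∧
  (∀ b ∈ order, ne.getD b [] = bk.getD b [] ∧ ne.getD b [] ≠ []) ∧
  (∀ b : String, (bk.getD b []).Nodup) ∧
  (∀ m b : String, ow.get? m = some b ↔ m ∈ bk.getD b [])

def pvAttachA (adj : PySem.Dict String (List String)) (ne : PySem.Dict String (List String))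
    (t : String) : PySem.Dict String (List String) :=
  if (ne.items.foldl (fun acc p =>
      acc ++ [(p.2.foldl (fun s m => if (adj.getD t []).contains m then s + 1 else s) (0 : Int), p.1)]) []).isEmpty then
    match PySem.List.max? ne.items (fun p => p.2.length) with
    | some p => ne.modify p.1 [] (· ++ [t])
    | none => ne
  else
    match PySem.List.max? (ne.items.foldl (fun acc p =>
        acc ++ [(p.2.foldl (fun s m => if (adj.getD t []).contains m then s + 1 else s) (0 : Int), p.1)]) [])
        (fun x => x.1) with
    | some p => ne.modify p.2 [] (· ++ [t])
    | none => ne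

def pvAttachB (nbrs : PySem.Dict String (PySem.Set String)) (order : List String)
    (st : PySem.Dict String (List String) × PySem.Dict String String) (t : String) :
    PySem.Dict String (List String) × PySem.Dict String String :=
  match PySem.List.max? order (fun b =>
      (((nbrs.getD t []).foldl (fun tl n =>
          match st.2.get? n with
          | some c => tl.modify c 0 (· + 1)
          | none => tl) (⟨order.map (fun b => (b, (0 : Int)))⟩ : PySem.Dict String Int)).getD b 0)) with
  | some b => (st.1.modify b [] (· ++ [t]), st.2.insert t b)
  | none => st

theorem pv_count_indicator (bk : PySem.Dict String (List String)) (ow : PySem.Dict String String)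
    (hnd : ∀ b' : String, (bk.getD b' []).Nodup)
    (hiff : ∀ m b' : String, ow.get? m = some b' ↔ m ∈ bk.getD b' [])
    (b n : String) :
    ((bk.getD b []).count n : Int) = if (ow.get? n == some b) then 1 else 0 := by
  by_cases hmem : n ∈ bk.getD b []
  · rw [List.count_eq_one_of_mem (hnd b) hmem]
    have := (hiff n b).2 hmem
    simp [this]
  · rw [List.count_eq_zero_of_not_mem hmem]
    have : ¬ ow.get? n = some b := fun e => hmem ((hiff n b).1 e)
    simp [beq_iff_eq, this]

theorem pv_attach_step (adj : PySem.Dict String (List String)) (nbrs : PySem.Dict String (PySem.Set String))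
    (hadj : ∀ k, nbrs.getD k [] = PySem.Set.ofList (adj.getD k []))
    (order : List String) (hond : order.Nodup) (o : String) (os : List String) (horder : order = o :: os)
    (ne bk : PySem.Dict String (List String)) (ow : PySem.Dict String String) (t : String)
    (h : pvCInv order ne bk ow) :
    ∃ m ∈ order, pvAttachA adj ne t = ne.modify m [] (· ++ [t])
      ∧ pvAttachB nbrs order (bk, ow) t = (bk.modify m [] (· ++ [t]), ow.insert t m) := by
  subst horder
  obtain ⟨hkeys, hord, hnd, hiff⟩ := h
  have hknd : ne.keys.Nodup := by rw [hkeys]; exact hond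
  have hitems : ne.items = (o :: os).map (fun b => (b, ne.getD b [])) := by
    conv_lhs => rw [PySem.Dict.items_eq_map_keys ne hknd []]
    rw [hkeys]
  -- A's score per bucket
  set f : String → Int := fun b => ((ne.getD b []).countP (fun m => (adj.getD t []).contains m) : Int) with hf
  have hscores : ne.items.foldl (fun acc p =>
        acc ++ [(p.2.foldl (fun s m => if (adj.getD t []).contains m then s + 1 else s) (0 : Int), p.1)]) []
      = (o :: os).map (fun b => (f b, b)) := by
    rw [PySem.List.foldl_append_singleton_eq_map, hitems, List.map_map, List.nil_append]
    apply List.map_congr_left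
    intro b _
    simp only [Function.comp]
    rw [PySem.List.foldl_if_add_one (fun m => (adj.getD t []).contains m) (ne.getD b []) 0]
    simp [hf]
  -- B's tally equals A's score on every bucket of order
  have htally : ∀ b ∈ (o :: os),
      (((nbrs.getD t []).foldl (fun tl n =>
          match ow.get? n with
          | some c => tl.modify c 0 (· + 1)
          | none => tl) (⟨(o :: os).map (fun b => (b, (0 : Int)))⟩ : PySem.Dict String Int)).getD b 0)
        = f b := by
    intro b hb
    rw [pv_tally, pv_getD_mk_map (o :: os) (fun _ => (0 : Int)) 0 b hond hb, zero_add]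
    rw [hadj t, ← PySem.List.dedup_eq_ofList]
    have hcP : ((PySem.List.dedup (adj.getD t [])).countP (fun n => ow.get? n == some b) : Int)
        = ((PySem.List.dedup (adj.getD t [])).map
            (fun n => if (ow.get? n == some b) then (1 : Int) else 0)).sum := by
      rw [PySem.List.sum_map_ite_one_zero]
    rw [hcP]
    have heq : ((PySem.List.dedup (adj.getD t [])).map
          (fun n => if (ow.get? n == some b) then (1 : Int) else 0)).sum
        = ((PySem.List.dedup (adj.getD t [])).map (fun n => ((bk.getD b []).count n : Int))).sum := by
      congr 1
      apply List.map_congr_left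
      intro n _
      rw [pv_count_indicator bk ow hnd hiff b n]
    rw [heq, ← pv_countP_eq_sum_dedup]
    simp only [hf]
    rw [(hord b hb).1]
  refine ⟨pvRunMax f o os, ?_, ?_, ?_⟩
  · rcases pv_runmax_mem f o os with h1 | h1
    · simp [h1]
    · simp [h1]
  · -- A's step
    show pvAttachA adj ne t = ne.modify (pvRunMax f o os) [] (· ++ [t])
    unfold pvAttachA
    rw [hscores, List.map_cons]
    simp only [List.isEmpty_cons, Bool.false_eq_true, if_false]
    rw [pv_max?_eq_runMax, pv_runmax_map]
  · -- B's step
    show pvAttachB nbrs (o :: os) (bk, ow) t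
        = (bk.modify (pvRunMax f o os) [] (· ++ [t]), ow.insert t (pvRunMax f o os))
    unfold pvAttachB
    dsimp only
    rw [pv_max?_congr_cons _ f o os htally]

theorem pv_cinv_step (order : List String) (ne bk : PySem.Dict String (List String))
    (ow : PySem.Dict String String) (t m : String) (hm : m ∈ order) (hfr : ow.get? t = none)
    (h : pvCInv order ne bk ow) :
    pvCInv order (ne.modify m [] (· ++ [t])) (bk.modify m [] (· ++ [t])) (ow.insert t m) := by
  obtain ⟨hkeys, hord, hnd, hiff⟩ := h
  obtain ⟨hnd', hiff'⟩ := pv_mark_step bk ow t m hfr hnd hiff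
  refine ⟨?_, ?_, hnd', hiff'⟩
  · rw [PySem.Dict.keys_modify, pv_keys_insert, pv_contains_of_mem_keys ne m (hkeys ▸ hm), if_pos rfl]
    exact hkeys
  · intro b hb
    by_cases hbb : b = m
    · subst hbb
      rw [PySem.Dict.getD_modify_self, PySem.Dict.getD_modify_self, (hord b hb).1]
      exact ⟨rfl, by simp⟩
    · rw [PySem.Dict.getD_modify_of_ne _ _ _ hbb, PySem.Dict.getD_modify_of_ne _ _ _ hbb]
      exact hord b hb

theorem pv_attach (adj : PySem.Dict String (List String)) (nbrs : PySem.Dict String (PySem.Set String))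
    (hadj : ∀ k, nbrs.getD k [] = PySem.Set.ofList (adj.getD k []))
    (order : List String) (hond : order.Nodup) (o : String) (os : List String) (horder : order = o :: os)
    (rem : List String) (ne bk : PySem.Dict String (List String)) (ow : PySem.Dict String String)
    (h : pvCInv order ne bk ow) (hrnd : rem.Nodup) (hrf : ∀ t ∈ rem, ow.get? t = none) :
    pvCInv order (rem.foldl (pvAttachA adj) ne)
      (rem.foldl (pvAttachB nbrs order) (bk, ow)).1
      (rem.foldl (pvAttachB nbrs order) (bk, ow)).2 := by
  induction rem generalizing ne bk ow with
  | nil => exact h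
  | cons t rem ih =>
    rw [List.foldl_cons, List.foldl_cons]
    obtain ⟨m, hm, eA, eB⟩ := pv_attach_step adj nbrs hadj order hond o os horder ne bk ow t h
    rw [eA, eB]
    apply ih _ _ _
      (pv_cinv_step order ne bk ow t m hm (hrf t (by simp)) h)
      (List.nodup_cons.1 hrnd).2
    intro u hu
    have hut : u ≠ t := by
      intro he
      subst he
      exact (List.nodup_cons.1 hrnd).1 hu
    rw [PySem.Dict.get?_insert_of_ne _ _ hut]
    exact hrf u (by simp [hu])

-- ---------- glue after phase 1 ----------
theorem pv_after_phase1 (component : List String) (relations : List (List (String × String)))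
    (bk : PySem.Dict String (List String)) (ow : PySem.Dict String String) (rem : List String)
    (hinv : pvBInv bk ow) (hrnd : rem.Nodup) (hrf : ∀ t ∈ rem, ow.get? t = none) :
    (if (⟨bk.items.filter (fun p => !p.2.isEmpty)⟩ : PySem.Dict String (List String)).size ≤ 1 then
      [PySem.List.sorted component (fun x => x)]
    else
      ((((rem.foldl (pvAttachA (relations.foldl (fun d r =>
          match (PySem.Dict.mk r).get? "from", (PySem.Dict.mk r).get? "to" with
          | some a, some b =>
              if a ∈ PySem.Set.ofList component ∧ b ∈ PySem.Set.ofList component then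
                (d.modify a [] (· ++ [b])).modify b [] (· ++ [a])
              else d
          | _, _ => d) PySem.Dict.empty))
          (⟨bk.items.filter (fun p => !p.2.isEmpty)⟩ : PySem.Dict String (List String))).values.filter
          (fun v => !v.isEmpty)).map (fun v => PySem.List.sorted v (fun x => x)))))
    = (if ((kwTables.map (·.1)).filter (fun b => !(bk.getD b []).isEmpty)).length ≤ 1 then
      [PySem.List.sorted component (fun x => x)]
    else
      ((kwTables.map (·.1)).filter (fun b => !(bk.getD b []).isEmpty)).map
        (fun b => PySem.List.sorted
          ((rem.foldl (pvAttachB (relations.foldl (fun d r =>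
              match (PySem.Dict.mk r).get? "from" with
              | none => d
              | some a =>
                match (PySem.Dict.mk r).get? "to" with
                | none => d
                | some b =>
                  if a ∈ PySem.Set.ofList component ∧ b ∈ PySem.Set.ofList component then
                    (d.modify a PySem.Set.empty (fun s => PySem.Set.add s b)).modify b PySem.Set.empty (fun s => PySem.Set.add s a)
                  else d) PySem.Dict.empty)
            ((kwTables.map (·.1)).filter (fun b => !(bk.getD b []).isEmpty))) (bk, ow)).1.getD b [])
          (fun x => x))) := by
  obtain ⟨hk, hnd, hiff⟩ := hinv
  have hnames_nd : ((kwTables.map (·.1)) : List String).Nodup := by decide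
  have hknd : bk.keys.Nodup := by rw [hk]; exact hnames_nd
  have hitems : bk.items = (kwTables.map (·.1)).map (fun b => (b, bk.getD b [])) := by
    rw [PySem.Dict.items_eq_map_keys bk hknd [], hk]
  set order := (kwTables.map (·.1)).filter (fun b => !(bk.getD b []).isEmpty) with horder
  have morder : bk.items.filter (fun p => !p.2.isEmpty)
      = order.map (fun b => (b, bk.getD b [])) := by
    rw [hitems, List.filter_map]
    rfl
  rw [morder]
  have hond : order.Nodup := List.Nodup.filter _ hnames_nd
  have hsize : (⟨order.map (fun b => (b, bk.getD b []))⟩ : PySem.Dict String (List String)).size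
      = order.length := by
    show (order.map (fun b => (b, bk.getD b []))).length = order.length
    rw [List.length_map]
  by_cases hord1 : order.length ≤ 1
  · rw [if_pos (by rw [hsize]; exact hord1), if_pos hord1]
  · rw [if_neg (by rw [hsize]; exact hord1), if_neg hord1]
    obtain ⟨o, os, hoos⟩ : ∃ o os, order = o :: os := by
      cases horder' : order with
      | nil => rw [horder'] at hord1; simp at hord1
      | cons o os => exact ⟨o, os, rfl⟩
    set ne0 : PySem.Dict String (List String) := ⟨order.map (fun b => (b, bk.getD b []))⟩ with hne0
    have hcinv : pvCInv order ne0 bk ow := by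
      refine ⟨?_, ?_, hnd, hiff⟩
      · show (order.map (fun b => (b, bk.getD b []))).map (·.1) = order
        rw [List.map_map]
        exact (List.map_congr_left (fun a ha => rfl)).trans (List.map_id _)
      · intro b hb
        have hgetd : ne0.getD b [] = bk.getD b [] :=
          pv_getD_mk_map order (fun b => bk.getD b []) [] b hond hb
        refine ⟨hgetd, ?_⟩
        rw [hgetd]
        intro h0
        have := List.of_mem_filter hb
        rw [h0] at this
        simp at this
    have hatt := pv_attach
      (relations.foldl (fun d r =>
          match (PySem.Dict.mk r).get? "from", (PySem.Dict.mk r).get? "to" with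
          | some a, some b =>
              if a ∈ PySem.Set.ofList component ∧ b ∈ PySem.Set.ofList component then
                (d.modify a [] (· ++ [b])).modify b [] (· ++ [a])
              else d
          | _, _ => d) PySem.Dict.empty)
      (relations.foldl (fun d r =>
          match (PySem.Dict.mk r).get? "from" with
          | none => d
          | some a =>
            match (PySem.Dict.mk r).get? "to" with
            | none => d
            | some b =>
              if a ∈ PySem.Set.ofList component ∧ b ∈ PySem.Set.ofList component then
                (d.modify a PySem.Set.empty (fun s => PySem.Set.add s b)).modify b PySem.Set.empty (fun s => PySem.Set.add s a)
              else d) PySem.Dict.empty)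
      (pv_adj_eq relations (PySem.Set.ofList component) PySem.Dict.empty PySem.Dict.empty (fun k => rfl))
      order hond o os hoos rem ne0 bk ow hcinv hrnd hrf
    obtain ⟨hkR, hordR, _, _⟩ := hatt
    rw [PySem.Dict.values_eq_map_keys _ (by rw [hkR]; exact hond) ([] : List String), hkR]
    rw [List.filter_eq_self.mpr ?hall]
    case hall =>
      intro v hv
      rcases List.mem_map.1 hv with ⟨b, hb, rfl⟩
      have := (hordR b hb).2
      simpa using this
    rw [List.map_map]
    apply List.map_congr_left
    intro b hb
    simp only [Function.comp]
    rw [(hordR b hb).1]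

theorem pv_glue (component : List String) (relations : List (List (String × String)))
    (hpre : component.Nodup) :
    (if (⟨(component.foldl pvStepA (⟨kwTables.map (fun p => (p.1, ([] : List String)))⟩, [])).1.items.filter
          (fun p => !p.2.isEmpty)⟩ : PySem.Dict String (List String)).size ≤ 1 then
      [PySem.List.sorted component (fun x => x)]
    else
      (((((component.foldl pvStepA (⟨kwTables.map (fun p => (p.1, ([] : List String)))⟩, [])).2.foldl
          (pvAttachA (relations.foldl (fun d r =>
            match (PySem.Dict.mk r).get? "from", (PySem.Dict.mk r).get? "to" with
            | some a, some b =>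
                if a ∈ PySem.Set.ofList component ∧ b ∈ PySem.Set.ofList component then
                  (d.modify a [] (· ++ [b])).modify b [] (· ++ [a])
                else d
            | _, _ => d) PySem.Dict.empty))
          (⟨(component.foldl pvStepA (⟨kwTables.map (fun p => (p.1, ([] : List String)))⟩, [])).1.items.filter
            (fun p => !p.2.isEmpty)⟩ : PySem.Dict String (List String))).values.filter
          (fun v => !v.isEmpty)).map (fun v => PySem.List.sorted v (fun x => x)))))
    = (if ((kwTables.map (·.1)).filter (fun b =>
          !((component.foldl pvStepB (⟨kwTables.map (fun p => (p.1, ([] : List String)))⟩, PySem.Dict.empty, [])).1.getD b []).isEmpty)).length ≤ 1 then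
      [PySem.List.sorted component (fun x => x)]
    else
      ((kwTables.map (·.1)).filter (fun b =>
          !((component.foldl pvStepB (⟨kwTables.map (fun p => (p.1, ([] : List String)))⟩, PySem.Dict.empty, [])).1.getD b []).isEmpty)).map
        (fun b => PySem.List.sorted
          (((component.foldl pvStepB (⟨kwTables.map (fun p => (p.1, ([] : List String)))⟩, PySem.Dict.empty, [])).2.2.foldl
            (pvAttachB (relations.foldl (fun d r =>
                match (PySem.Dict.mk r).get? "from" with
                | none => d
                | some a =>
                  match (PySem.Dict.mk r).get? "to" with
                  | none => d
                  | some b =>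
                    if a ∈ PySem.Set.ofList component ∧ b ∈ PySem.Set.ofList component then
                      (d.modify a PySem.Set.empty (fun s => PySem.Set.add s b)).modify b PySem.Set.empty (fun s => PySem.Set.add s a)
                    else d) PySem.Dict.empty)
              ((kwTables.map (·.1)).filter (fun b =>
                !((component.foldl pvStepB (⟨kwTables.map (fun p => (p.1, ([] : List String)))⟩, PySem.Dict.empty, [])).1.getD b []).isEmpty)))
            ((component.foldl pvStepB (⟨kwTables.map (fun p => (p.1, ([] : List String)))⟩, PySem.Dict.empty, [])).1,
             (component.foldl pvStepB (⟨kwTables.map (fun p => (p.1, ([] : List String)))⟩, PySem.Dict.empty, [])).2.1)).1.getD b [])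
          (fun x => x))) := by
  have hinit : pvBInv (⟨kwTables.map (fun p => (p.1, ([] : List String)))⟩ : PySem.Dict String (List String))
      PySem.Dict.empty := by
    refine ⟨by decide, ?_, ?_⟩
    · intro b
      rw [pv_getD_mk_nil]
      exact List.nodup_nil
    · intro m b
      rw [pv_getD_mk_nil]
      simp [PySem.Dict.get?, PySem.Dict.empty]
  obtain ⟨hbk, hrem, hbinv, hrnd, hrf⟩ := pv_phase1 component
    (⟨kwTables.map (fun p => (p.1, ([] : List String)))⟩ : PySem.Dict String (List String))
    PySem.Dict.empty [] hinit hpre (by simp) (by simp) (by simp)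
  rw [hbk, hrem]
  exact pv_after_phase1 component relations
    (component.foldl pvStepB (⟨kwTables.map (fun p => (p.1, ([] : List String)))⟩, PySem.Dict.empty, [])).1
    (component.foldl pvStepB (⟨kwTables.map (fun p => (p.1, ([] : List String)))⟩, PySem.Dict.empty, [])).2.1
    (component.foldl pvStepB (⟨kwTables.map (fun p => (p.1, ([] : List String)))⟩, PySem.Dict.empty, [])).2.2
    hbinv hrnd hrf

-- ===== VERDICT (by name: the statement is the Claim_ definition above) =====
theorem seed_component_by_keywords_spec : Claim_equal_seed_component_by_keywords := by
  intro component relations _hdom hpre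
  unfold Spec_seed_component_by_keywords seed_component_by_keywords seed_component_by_keywords_alt
  by_cases hlen : component.length ≤ 2
  · rw [if_pos hlen, if_pos hlen]
  · rw [if_neg hlen, if_neg hlen]
    exact pv_glue component relations hpre
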